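-- pv_equiv track=rewrite | github.com/The-Leading-Executives-Alliance-Project/concis_ML | app.py | top_longest_common_substrings
-- ===== SOURCE A (Python) =====
-- def top_longest_common_substrings(text1, text2, top_n=3):
--     dp = [[0] * (len(text2) + 1) for _ in range(len(text1) + 1)]
--     common_substrings = []
--
--     for i in range(1, len(text1) + 1):
--         for j in range(1, len(text2) + 1):
--             if text1[i - 1] == text2[j - 1]:
--                 dp[i][j] = dp[i - 1][j - 1] + 1
--                 if dp[i][j] > 0:
--                     common_substrings.append((i, dp[i][j]))
--             else:
--                 dp[i][j] = 0
--
--     # Sort common substrings by length and end position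
--     common_substrings.sort(key=lambda x: (-x[1], x[0]))
--
--     result = []
--     last_end_pos = -1
--
--     for end_pos, length in common_substrings:
--         start_pos = end_pos - length
--
--         # Check if the current substring overlaps with previously added substrings
--         if start_pos > last_end_pos:
--             result.append(text1[start_pos: end_pos])
--             last_end_pos = end_pos
--
--             if len(result) == top_n:
--                 break
--
--     # Continue searching if we haven't found enough non-overlapping substrings
--     while len(result) < top_n:
--         for end_pos, length in common_substrings:
--             start_pos = end_pos - length
--             if start_pos > last_end_pos:
--                 result.append(text1[start_pos: end_pos])
--                 last_end_pos = end_pos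
--
--                 if len(result) == top_n:
--                     break
--
--         if len(result) < top_n:
--             break  # Exit loop if no more non-overlapping substrings can be found
--
--     return result
-- ===== SOURCE B (Python) =====
-- def top_longest_common_substrings(text1, text2, top_n=3):
--     n, m = len(text1), len(text2)
--     candidates = []
--     # Walk each diagonal once with a single running match counter (no dp table).
--     for d in range(1 - n, m):
--         i = max(0, -d)
--         j = i + d
--         run = 0
--         while i < n and j < m:
--             if text1[i] == text2[j]:
--                 run += 1
--                 candidates.append((i + 1, run))
--             else:
--                 run = 0
--             i += 1
--             j += 1
--
--     # The sort key (-length, end_pos) determines the pair, so the candidate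
--     # order before sorting does not matter.
--     candidates.sort(key=lambda x: (-x[1], x[0]))
--
--     result = []
--     last_end_pos = -1
--     for end_pos, length in candidates:
--         start_pos = end_pos - length
--         if start_pos > last_end_pos:
--             result.append(text1[start_pos:end_pos])
--             last_end_pos = end_pos
--             if len(result) == top_n:
--                 break
--     return result
-- ===== Notes on version B (the rewrite author's own statement) =====
-- stated objective: simpler
-- what changed: B drops A's (len1+1)x(len2+1) dp table and collects the same candidate pairs by walking each diagonal once with a single running match counter (the sort key (-length, end_pos) determines the pair, so traversal order cannot change the sorted list), and it omits A's dead trailing 'while len(result) < top_n' re-scan loop, which can never add a substring.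
import Mathlib
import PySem

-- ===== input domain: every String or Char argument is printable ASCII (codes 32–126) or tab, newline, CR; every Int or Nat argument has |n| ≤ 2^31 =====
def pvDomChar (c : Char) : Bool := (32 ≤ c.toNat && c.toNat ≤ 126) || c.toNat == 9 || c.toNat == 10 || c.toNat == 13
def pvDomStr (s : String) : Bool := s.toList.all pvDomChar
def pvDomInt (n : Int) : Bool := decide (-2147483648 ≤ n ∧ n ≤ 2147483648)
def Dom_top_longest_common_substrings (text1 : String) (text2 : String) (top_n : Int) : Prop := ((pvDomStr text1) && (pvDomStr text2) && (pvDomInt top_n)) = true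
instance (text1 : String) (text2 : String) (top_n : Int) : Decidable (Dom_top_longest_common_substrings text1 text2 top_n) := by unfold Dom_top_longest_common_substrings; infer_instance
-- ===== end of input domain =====

-- B replaces A's 2D dp-table row scan by a walk along each diagonal with a single running
-- match counter and drops A's dead trailing re-scan loop; the sort key (-length, end_pos)
-- determines the candidate pair, so the traversal order does not change the result
-- (objective: simpler; timing reported no ≥1.5× speedup, so none is claimed).


-- ===== PORT A =====
-- inner loop body for dp row i = i0+1: st = (row built so far, common_substrings), prev = dp[i-1]
def pvAStep (l1 l2 : List Char) (i0 : Nat) (prev : List Int)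
    (st : List Int × List (Int × Int)) (j0 : Nat) : List Int × List (Int × Int) :=
  if l1[i0]? == l2[j0]? then
    let v := prev.getD j0 0 + 1            -- dp[i][j] = dp[i-1][j-1] + 1
    (st.1 ++ [v], if v > 0 then st.2 ++ [((i0 : Int) + 1, v)] else st.2)
  else
    (st.1 ++ [0], st.2)                    -- dp[i][j] = 0

-- one outer iteration: builds dp row i (dp[i][0] = 0 stays from the zero matrix)
def pvARow (l1 l2 : List Char) (st : List Int × List (Int × Int)) (i0 : Nat) :
    List Int × List (Int × Int) :=
  (List.range l2.length).foldl (pvAStep l1 l2 i0 st.1) ([0], st.2)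

-- the greedy selection for-loop with its 'len(result) == top_n' break; returns (result, last_end_pos)
def pvAGreedy (text1 : String) (top_n : Int) :
    List (Int × Int) → List String → Int → List String × Int
  | [], res, last => (res, last)
  | (e, len) :: rest, res, last =>
    if e - len > last then
      let res' := res ++ [PySem.Str.slice text1 (some (e - len)) (some e)]
      if (res'.length : Int) = top_n then (res', e)
      else pvAGreedy text1 top_n rest res' e
    else pvAGreedy text1 top_n rest res last

def top_longest_common_substrings (text1 : String) (text2 : String) (top_n : Int) : List String :=
  let l1 := text1.toList
  let l2 := text2.toList
  let fin := (List.range l1.length).foldl (pvARow l1 l2) (List.replicate (l2.length + 1) 0, [])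
  let cands := PySem.List.sorted2 fin.2 (fun p => -p.2) (fun p => p.1)
  let g := pvAGreedy text1 top_n cands [] (-1)
  -- trailing 'while len(result) < top_n' loop: its body executes at most once (the inner
  -- for-loop either reaches top_n or the final 'if len(result) < top_n: break' exits the
  -- while), so it is ported exactly as one guarded extra pass
  if (g.1.length : Int) < top_n then (pvAGreedy text1 top_n cands g.1 g.2).1 else g.1

-- ===== PORT B =====
-- the 'while i < n and j < m' diagonal walk with its running match counter
def pvBWalk (l1 l2 : List Char) (i j : Nat) (run : Int) (acc : List (Int × Int)) :
    List (Int × Int) :=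
  if h : i < l1.length ∧ j < l2.length then
    if l1[i]? == l2[j]? then
      pvBWalk l1 l2 (i + 1) (j + 1) (run + 1) (acc ++ [((i : Int) + 1, run + 1)])
    else
      pvBWalk l1 l2 (i + 1) (j + 1) 0 acc
  else acc
  termination_by l1.length - i
  decreasing_by all_goals omega

-- B's greedy selection loop (no last_end_pos returned, no trailing rescan)
def pvBGreedy (text1 : String) (top_n : Int) :
    List (Int × Int) → List String → Int → List String
  | [], res, _ => res
  | (e, len) :: rest, res, last =>
    if e - len > last then
      let res' := res ++ [PySem.Str.slice text1 (some (e - len)) (some e)]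
      if (res'.length : Int) = top_n then res'
      else pvBGreedy text1 top_n rest res' e
    else pvBGreedy text1 top_n rest res last

def top_longest_common_substrings_alt (text1 : String) (text2 : String) (top_n : Int) : List String :=
  let l1 := text1.toList
  let l2 := text2.toList
  -- for d in range(1 - n, m): i = max(0, -d); j = i + d; walk the diagonal
  let cands := (PySem.List.pyRange (1 - (l1.length : Int)) (l2.length : Int) 1).foldl
    (fun acc d =>
      pvBWalk l1 l2 (max 0 (-d)).toNat (((max 0 (-d)).toNat : Int) + d).toNat 0 acc) []
  pvBGreedy text1 top_n (PySem.List.sorted2 cands (fun p => -p.2) (fun p => p.1)) [] (-1)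

-- ===== PRECONDITION & SPEC =====
def Spec_top_longest_common_substrings (text1 : String) (text2 : String) (top_n : Int) (out : List String) : Prop := out = top_longest_common_substrings_alt text1 text2 top_n
instance (text1 : String) (text2 : String) (top_n : Int) (out : List String) : Decidable (Spec_top_longest_common_substrings text1 text2 top_n out) := by unfold Spec_top_longest_common_substrings; infer_instance

-- ===== CLAIM (what is proved, stated in full; the proofs are below) =====
def Claim_equal_top_longest_common_substrings : Prop := ∀ (text1 : String) (text2 : String) (top_n : Int), Dom_top_longest_common_substrings text1 text2 top_n → Spec_top_longest_common_substrings text1 text2 top_n (top_longest_common_substrings text1 text2 top_n)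

-- ===== LEMMAS AND PROOFS =====

-- the length of the common run ending at cell (a-1, b-1); equals A's dp[a][b]
def pvRunLen (l1 l2 : List Char) : Nat → Nat → Int
  | 0, _ => 0
  | _ + 1, 0 => 0
  | a + 1, b + 1 => if l1[a]? == l2[b]? then pvRunLen l1 l2 a b + 1 else 0

theorem pvRunLen_nonneg (l1 l2 : List Char) (a b : Nat) : 0 ≤ pvRunLen l1 l2 a b := by
  induction a generalizing b with
  | zero => simp [pvRunLen]
  | succ a ih =>
    cases b with
    | zero => simp [pvRunLen]
    | succ b =>
      simp only [pvRunLen]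
      split
      · exact add_nonneg (ih b) zero_le_one
      · exact le_refl 0

theorem pvRunLen_zero_right (l1 l2 : List Char) (a : Nat) : pvRunLen l1 l2 a 0 = 0 := by
  cases a <;> simp [pvRunLen]

-- the candidate a cell contributes: some (i, dp-value) at a match, none otherwise
def pvG (l1 l2 : List Char) (ab : Nat × Nat) : Option (Int × Int) :=
  if l1[ab.1]? == l2[ab.2]? then some ((ab.1 : Int) + 1, pvRunLen l1 l2 ab.1 ab.2 + 1) else none

-- A's dp row i as a function of j: dp[i][j] = pvRunLen i j
def pvRowV (l1 l2 : List Char) (i : Nat) : List Int :=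
  (List.range (l2.length + 1)).map (fun j => pvRunLen l1 l2 i j)

-- the candidates appended while scanning the j-indices js during outer iteration i0
def pvCandRowOn (l1 l2 : List Char) (i0 : Nat) (js : List Nat) : List (Int × Int) :=
  js.filterMap
    (fun j0 => if l1[i0]? == l2[j0]? then some ((i0 : Int) + 1, pvRunLen l1 l2 i0 j0 + 1) else none)

-- A's full candidate list
def pvCands (l1 l2 : List Char) (n : Nat) : List (Int × Int) :=
  (List.range n).flatMap (fun i0 => pvCandRowOn l1 l2 i0 (List.range l2.length))

-- the cells in row-major order / diagonal-major order
def pvRowIdx (n m : Nat) : List (Nat × Nat) :=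
  (List.range n).flatMap (fun i0 => (List.range m).map (fun j0 => (i0, j0)))

def pvDiagStart (d : Int) : Nat × Nat :=
  ((max 0 (-d)).toNat, (((max 0 (-d)).toNat : Int) + d).toNat)

def pvDiagIdx (n m : Nat) : List (Nat × Nat) :=
  (PySem.List.pyRange (1 - (n : Int)) (m : Int) 1).flatMap (fun d =>
    (List.range (min (n - (pvDiagStart d).1) (m - (pvDiagStart d).2))).map
      (fun k => ((pvDiagStart d).1 + k, (pvDiagStart d).2 + k)))

theorem pvRowV_getD (l1 l2 : List Char) (i j0 : Nat) (h : j0 < l2.length + 1) :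
    (pvRowV l1 l2 i)[j0]?.getD 0 = pvRunLen l1 l2 i j0 := by
  simp [pvRowV, h]

theorem pvCandRowOn_cons (l1 l2 : List Char) (i0 j0 : Nat) (js : List Nat) :
    pvCandRowOn l1 l2 i0 (j0 :: js) = pvCandRowOn l1 l2 i0 [j0] ++ pvCandRowOn l1 l2 i0 js := by
  simp only [pvCandRowOn, List.filterMap_cons, List.filterMap_nil]
  split <;> simp

theorem pvA_inner (l1 l2 : List Char) (i0 : Nat) (js : List Nat)
    (hjs : ∀ j0 ∈ js, j0 < l2.length) (row : List Int) (subs : List (Int × Int)) :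
    js.foldl (pvAStep l1 l2 i0 (pvRowV l1 l2 i0)) (row, subs) =
      (row ++ js.map (fun j0 => pvRunLen l1 l2 (i0 + 1) (j0 + 1)),
       subs ++ pvCandRowOn l1 l2 i0 js) := by
  induction js generalizing row subs with
  | nil => simp [pvCandRowOn]
  | cons j0 js ih =>
    have hj : j0 < l2.length := hjs j0 (by simp)
    have hg := pvRowV_getD l1 l2 i0 j0 (by omega)
    have hnn := pvRunLen_nonneg l1 l2 i0 j0
    have hstep : pvAStep l1 l2 i0 (pvRowV l1 l2 i0) (row, subs) j0 =
        (row ++ [pvRunLen l1 l2 (i0 + 1) (j0 + 1)],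
         subs ++ pvCandRowOn l1 l2 i0 [j0]) := by
      by_cases hm : l1[i0]? == l2[j0]?
      · have hm' : l1[i0]? = l2[j0]? := by simpa using hm
        have hrun : pvRunLen l1 l2 (i0 + 1) (j0 + 1) = pvRunLen l1 l2 i0 j0 + 1 := by
          simp [pvRunLen, hm]
        simp [pvAStep, pvCandRowOn, hm', hg, hrun, hnn]
      · have hm' : ¬ l1[i0]? = l2[j0]? := by simpa using hm
        simp [pvAStep, pvCandRowOn, pvRunLen, hm, hm']
    rw [List.foldl_cons, hstep, ih (fun j hj' => hjs j (by simp [hj'])),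
      pvCandRowOn_cons l1 l2 i0 j0 js]
    simp [pvCandRowOn]

theorem pvRowV_succ (l1 l2 : List Char) (i0 : Nat) :
    pvRowV l1 l2 (i0 + 1) =
      [0] ++ (List.range l2.length).map (fun j0 => pvRunLen l1 l2 (i0 + 1) (j0 + 1)) := by
  simp [pvRowV, List.range_succ_eq_map, List.map_map, Function.comp, pvRunLen]

theorem pvA_row (l1 l2 : List Char) (i0 : Nat) (subs : List (Int × Int)) :
    pvARow l1 l2 (pvRowV l1 l2 i0, subs) i0 =
      (pvRowV l1 l2 (i0 + 1), subs ++ pvCandRowOn l1 l2 i0 (List.range l2.length)) := by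
  simp only [pvARow]
  rw [pvA_inner l1 l2 i0 _ (fun j0 hj => List.mem_range.mp hj), pvRowV_succ]

theorem pvA_outer (l1 l2 : List Char) (n : Nat) :
    (List.range n).foldl (pvARow l1 l2) (pvRowV l1 l2 0, []) =
      (pvRowV l1 l2 n, pvCands l1 l2 n) := by
  induction n with
  | zero => simp [pvCands]
  | succ n ih =>
    rw [List.range_succ, List.foldl_append, ih]
    simp [pvA_row, pvCands, List.range_succ]

theorem pvRowV_zero (l1 l2 : List Char) :
    pvRowV l1 l2 0 = List.replicate (l2.length + 1) 0 := by
  simp [pvRowV, pvRunLen, List.map_const']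

theorem pvCands_eq (l1 l2 : List Char) (n : Nat) :
    pvCands l1 l2 n = (pvRowIdx n l2.length).filterMap (pvG l1 l2) := by
  simp only [pvCands, pvRowIdx, List.filterMap_flatMap, List.filterMap_map]
  rfl

theorem pvDiagStart_cast (d : Int) :
    ((pvDiagStart d).1 : Int) = max 0 (-d) ∧ ((pvDiagStart d).2 : Int) = max 0 (-d) + d := by
  unfold pvDiagStart
  refine ⟨by omega, by omega⟩

-- B's walk along a diagonal collects exactly the candidates of its cells
theorem pvBWalk_eq (l1 l2 : List Char) (fuel : Nat) :
    ∀ (i j : Nat) (run : Int) (acc : List (Int × Int)),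
    l1.length - i ≤ fuel → run = pvRunLen l1 l2 i j →
    pvBWalk l1 l2 i j run acc =
      acc ++ ((List.range (min (l1.length - i) (l2.length - j))).map
        (fun k => (i + k, j + k))).filterMap (pvG l1 l2) := by
  induction fuel with
  | zero =>
    intro i j run acc hf _
    rw [pvBWalk, dif_neg (by omega)]
    have : min (l1.length - i) (l2.length - j) = 0 := by omega
    simp [this]
  | succ fuel ih =>
    intro i j run acc hf hrun
    rw [pvBWalk]
    by_cases h : i < l1.length ∧ j < l2.length
    · rw [dif_pos h]
      have hmin : min (l1.length - i) (l2.length - j) =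
          min (l1.length - (i + 1)) (l2.length - (j + 1)) + 1 := by omega
      have hshift : (fun k => (i + k, j + k)) ∘ Nat.succ =
          (fun k => ((i + 1) + k, (j + 1) + k)) := by
        funext k
        simp only [Function.comp_apply]
        exact Prod.ext (by omega) (by omega)
      rw [hmin, List.range_succ_eq_map, List.map_cons, List.map_map, hshift,
        List.filterMap_cons]
      by_cases hm : l1[i]? == l2[j]?
      · have hrun' : run + 1 = pvRunLen l1 l2 (i + 1) (j + 1) := by
          simp [pvRunLen, hm, hrun]
        rw [if_pos hm, ih (i + 1) (j + 1) (run + 1) _ (by omega) hrun']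
        have : pvG l1 l2 (i, j) = some ((i : Int) + 1, run + 1) := by
          simp [pvG, hm, hrun]
        simp [this]
      · have hrun' : (0 : Int) = pvRunLen l1 l2 (i + 1) (j + 1) := by
          simp [pvRunLen, hm]
        rw [if_neg hm, ih (i + 1) (j + 1) 0 _ (by omega) hrun']
        have : pvG l1 l2 (i, j) = none := by simp [pvG, hm]
        simp [this]
    · rw [dif_neg h]
      have : min (l1.length - i) (l2.length - j) = 0 := by omega
      simp [this]

theorem pvB_cands (l1 l2 : List Char) :
    (PySem.List.pyRange (1 - (l1.length : Int)) (l2.length : Int) 1).foldl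
      (fun acc d =>
        pvBWalk l1 l2 (max 0 (-d)).toNat (((max 0 (-d)).toNat : Int) + d).toNat 0 acc) [] =
      (pvDiagIdx l1.length l2.length).filterMap (pvG l1 l2) := by
  rw [PySem.List.foldl_congr_mem _ _
    (fun acc d =>
      acc ++ ((List.range (min (l1.length - (pvDiagStart d).1) (l2.length - (pvDiagStart d).2))).map
        (fun k => ((pvDiagStart d).1 + k, (pvDiagStart d).2 + k))).filterMap (pvG l1 l2)) []
    ?_]
  · rw [PySem.List.foldl_append_eq_flatMap]
    simp only [pvDiagIdx, List.filterMap_flatMap, List.nil_append]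
  · intro acc d _
    obtain ⟨c1, c2⟩ := pvDiagStart_cast d
    have hrun0 : (0 : Int) = pvRunLen l1 l2 (pvDiagStart d).1 (pvDiagStart d).2 := by
      by_cases hd : 0 ≤ d
      · have h1 : (pvDiagStart d).1 = 0 := by omega
        rw [h1]
        simp [pvRunLen]
      · have h2 : (pvDiagStart d).2 = 0 := by omega
        rw [h2, pvRunLen_zero_right]
    exact pvBWalk_eq l1 l2 l1.length (pvDiagStart d).1 (pvDiagStart d).2 0 acc
      (by omega) hrun0

theorem pvRowIdx_nodup (n m : Nat) : (pvRowIdx n m).Nodup := by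
  rw [pvRowIdx, List.nodup_flatMap]
  refine ⟨fun i0 _ => List.Nodup.map (fun a b h => by simpa using congrArg Prod.snd h)
    List.nodup_range, ?_⟩
  refine List.pairwise_lt_range.imp ?_
  intro i0 i1 hlt p hp hp'
  simp only [List.mem_map, List.mem_range] at hp hp'
  obtain ⟨j0, -, rfl⟩ := hp
  obtain ⟨j1, -, he⟩ := hp'
  have := congrArg Prod.fst he
  simp at this
  omega

-- every cell of a diagonal satisfies column - row = d
theorem pvDiag_delta (n m : Nat) (d : Int) (p : Nat × Nat)
    (hp : p ∈ (List.range (min (n - (pvDiagStart d).1) (m - (pvDiagStart d).2))).map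
      (fun k => ((pvDiagStart d).1 + k, (pvDiagStart d).2 + k))) :
    (p.2 : Int) - (p.1 : Int) = d := by
  obtain ⟨c1, c2⟩ := pvDiagStart_cast d
  obtain ⟨k, -, rfl⟩ := List.mem_map.mp hp
  simp
  omega

theorem pvDiagIdx_nodup (n m : Nat) : (pvDiagIdx n m).Nodup := by
  rw [pvDiagIdx, List.nodup_flatMap]
  refine ⟨fun d _ => List.Nodup.map (fun a b h => by simpa using congrArg Prod.fst h)
    List.nodup_range, ?_⟩
  refine (PySem.List.pairwise_lt_pyRange_one _ _).imp ?_
  intro d d' hlt p hp hp'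
  have h1 := pvDiag_delta n m d p hp
  have h2 := pvDiag_delta n m d' p hp'
  omega

theorem mem_pvRowIdx (n m : Nat) (p : Nat × Nat) : p ∈ pvRowIdx n m ↔ p.1 < n ∧ p.2 < m := by
  simp only [pvRowIdx, List.mem_flatMap, List.mem_map, List.mem_range]
  constructor
  · rintro ⟨i0, hi, j0, hj, rfl⟩; exact ⟨hi, hj⟩
  · rintro ⟨h1, h2⟩; exact ⟨p.1, h1, p.2, h2, rfl⟩

theorem mem_pvDiagIdx (n m : Nat) (p : Nat × Nat) : p ∈ pvDiagIdx n m ↔ p.1 < n ∧ p.2 < m := by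
  simp only [pvDiagIdx, List.mem_flatMap, List.mem_map, List.mem_range,
    PySem.List.mem_pyRange_one]
  constructor
  · rintro ⟨d, ⟨hd1, hd2⟩, k, hk, rfl⟩
    obtain ⟨h1, h2⟩ := pvDiagStart_cast d
    refine ⟨?_, ?_⟩ <;> · simp; omega
  · rintro ⟨h1, h2⟩
    refine ⟨(p.2 : Int) - (p.1 : Int), ⟨by omega, by omega⟩, min p.1 p.2, ?_⟩
    obtain ⟨c1, c2⟩ := pvDiagStart_cast ((p.2 : Int) - (p.1 : Int))
    constructor
    · omega
    · exact Prod.ext (by omega) (by omega)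

theorem pvIdx_perm (n m : Nat) : (pvDiagIdx n m).Perm (pvRowIdx n m) :=
  (List.perm_ext_iff_of_nodup (pvDiagIdx_nodup n m) (pvRowIdx_nodup n m)).mpr
    (fun p => by rw [mem_pvDiagIdx, mem_pvRowIdx])

-- the Python sort key (-length, end_pos) is the lexicographic order on Int × Int
theorem pvSorted2_eq_sorted_lex (xs : List (Int × Int)) :
    PySem.List.sorted2 xs (fun p => -p.2) (fun p => p.1) =
      PySem.List.sorted xs (fun p => toLex (-p.2, p.1)) := by
  rw [PySem.List.sorted_eq_foldl_insertBy]
  simp only [PySem.List.sorted2, if_neg (by simp : ¬ (false = true))]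
  have hb : (fun (a b : Int × Int) =>
        decide ((-a.2) < (-b.2)) || !decide ((-b.2) < (-a.2)) && decide (a.1 < b.1))
      = (fun a b => decide ((fun (p : Int × Int) => toLex (-p.2, p.1)) a
          < (fun (p : Int × Int) => toLex (-p.2, p.1)) b)) := by
    funext a b
    by_cases h1 : (-a.2 : Int) < -b.2 <;> by_cases h2 : (-b.2 : Int) < -a.2 <;>
      by_cases h3 : (a.1 : Int) < b.1 <;> simp [Prod.Lex.lt_iff, h1, h2, h3] <;> omega
  rw [hb]

theorem pvSorted2_eq_of_perm (xs ys : List (Int × Int)) (h : xs.Perm ys) :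
    PySem.List.sorted2 xs (fun p => -p.2) (fun p => p.1) =
      PySem.List.sorted2 ys (fun p => -p.2) (fun p => p.1) := by
  rw [pvSorted2_eq_sorted_lex, pvSorted2_eq_sorted_lex]
  refine PySem.List.sorted_eq_sorted_of_perm xs ys _ ?_ h
  intro a b hab
  have h1 : (-a.2, a.1) = (-b.2, b.1) := by simpa using hab
  have h2 := congrArg Prod.fst h1
  have h3 := congrArg Prod.snd h1
  simp at h2 h3
  exact Prod.ext h3 h2

theorem pvCands_len_pos (l1 l2 : List Char) (n : Nat) (p : Int × Int)
    (hp : p ∈ pvCands l1 l2 n) : 0 ≤ p.2 := by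
  obtain ⟨i0, -, hp⟩ := List.mem_flatMap.mp hp
  obtain ⟨j0, -, hp⟩ := List.mem_filterMap.mp hp
  by_cases hm : l1[i0]? == l2[j0]?
  · rw [if_pos hm] at hp
    cases hp
    have := pvRunLen_nonneg l1 l2 i0 j0
    simp; omega
  · rw [if_neg hm] at hp; cases hp

theorem pvGreedy_fst (t : String) (tn : Int) (cs : List (Int × Int)) (res : List String)
    (last : Int) : (pvAGreedy t tn cs res last).1 = pvBGreedy t tn cs res last := by
  induction cs generalizing res last with
  | nil => simp [pvAGreedy, pvBGreedy]
  | cons p cs ih =>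
    obtain ⟨e, len⟩ := p
    simp only [pvAGreedy, pvBGreedy]
    split
    · split
      · rfl
      · exact ih _ _
    · exact ih _ _

theorem pvGreedy_last_mono (t : String) (tn : Int) (cs : List (Int × Int))
    (hpos : ∀ p ∈ cs, 0 ≤ p.2) (res : List String) (last : Int) :
    last ≤ (pvAGreedy t tn cs res last).2 := by
  induction cs generalizing res last with
  | nil => simp [pvAGreedy]
  | cons p cs ih =>
    obtain ⟨e, len⟩ := p
    have hlen : 0 ≤ len := hpos (e, len) (by simp)
    have hpos' : ∀ p ∈ cs, 0 ≤ p.2 := fun p hp => hpos p (by simp [hp])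
    simp only [pvAGreedy]
    split
    · rename_i hgt
      split
      · simpa using by omega
      · exact le_trans (by omega) (ih hpos' _ e)
    · exact ih hpos' _ last

theorem pvGreedy_complete (t : String) (tn : Int) (cs : List (Int × Int))
    (hpos : ∀ p ∈ cs, 0 ≤ p.2) (res : List String) (last : Int) :
    ((pvAGreedy t tn cs res last).1.length : Int) = tn ∨
      ∀ p ∈ cs, p.1 - p.2 ≤ (pvAGreedy t tn cs res last).2 := by
  induction cs generalizing res last with
  | nil => right; simp
  | cons p cs ih =>
    obtain ⟨e, len⟩ := p
    have hlen : 0 ≤ len := hpos (e, len) (by simp)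
    have hpos' : ∀ p ∈ cs, 0 ≤ p.2 := fun p hp => hpos p (by simp [hp])
    simp only [pvAGreedy]
    split
    · rename_i hgt
      split
      · rename_i hbrk; left; simpa using hbrk
      · rcases ih hpos' (res ++ [PySem.Str.slice t (some (e - len)) (some e)]) e with h | h
        · left; exact h
        · right
          intro p hp
          rcases List.mem_cons.mp hp with rfl | hp
          · exact le_trans (by omega) (pvGreedy_last_mono t tn cs hpos' _ e)
          · exact h p hp
    · rename_i hle
      rcases ih hpos' res last with h | h
      · left; exact h
      · right
        intro p hp
        rcases List.mem_cons.mp hp with rfl | hp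
        · exact le_trans (by omega) (pvGreedy_last_mono t tn cs hpos' res last)
        · exact h p hp

theorem pvGreedy_skip (t : String) (tn : Int) (cs : List (Int × Int)) (res : List String)
    (last : Int) (h : ∀ p ∈ cs, p.1 - p.2 ≤ last) :
    pvAGreedy t tn cs res last = (res, last) := by
  induction cs with
  | nil => simp [pvAGreedy]
  | cons p cs ih =>
    obtain ⟨e, len⟩ := p
    have he : e - len ≤ last := h (e, len) (by simp)
    simp only [pvAGreedy]
    rw [if_neg (by omega)]
    exact ih (fun p hp => h p (by simp [hp]))

-- ===== VERDICT (by name: the statement is the Claim_ definition above) =====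
theorem top_longest_common_substrings_spec : Claim_equal_top_longest_common_substrings := by
  intro text1 text2 top_n _
  unfold Spec_top_longest_common_substrings
  unfold top_longest_common_substrings top_longest_common_substrings_alt
  simp only []
  rw [pvB_cands, ← pvRowV_zero, pvA_outer]
  set l1 := text1.toList
  set l2 := text2.toList
  rw [pvSorted2_eq_of_perm _ _ ((pvIdx_perm l1.length l2.length).filterMap (pvG l1 l2)),
    ← pvCands_eq]
  set cands := PySem.List.sorted2 (pvCands l1 l2 l1.length) (fun p => -p.2) (fun p => p.1)
    with hcands
  have hpos : ∀ p ∈ cands, 0 ≤ p.2 := by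
    intro p hp
    exact pvCands_len_pos l1 l2 l1.length p
      ((PySem.List.sorted2_perm _ _ _ _).mem_iff.mp hp)
  set g := pvAGreedy text1 top_n cands [] (-1) with hg
  rw [← pvGreedy_fst]
  by_cases hlt : ((g.1.length : Int) < top_n)
  · rw [if_pos hlt]
    rcases pvGreedy_complete text1 top_n cands hpos [] (-1) with h | h
    · rw [← hg] at h; omega
    · rw [← hg] at h
      rw [pvGreedy_skip text1 top_n cands g.1 g.2 h]
  · rw [if_neg hlt]
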